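-- pv_equiv track=rewrite | github.com/slava-sh/code-plagiarism-detector | data/open-Green/sources/001052-open-2015-290-Green.py | solve
-- ===== SOURCE A (Python) =====
-- def solve(n, k):
--     if k == 1:
--         return (n + 1) // 2
--     i = 2
--     while i * i <= n:
--         if n % i == 0:
--             return solve(n // i, k - 1) * ((i + 1) // 2)
--         i += 1
--     return solve(n, k - 1)
-- ===== SOURCE B (Python) =====
-- def solve(n, k):
--     # Single trial-division sweep: the smallest factor never decreases after a
--     # division, so i is shared across all k-1 extraction steps (O(sqrt(n)+k)
--     # instead of restarting from 2 each recursion).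
--     acc = 1
--     i = 2
--     while k > 1 and i * i <= n:
--         if n % i == 0:
--             acc *= (i + 1) // 2
--             n //= i
--             k -= 1
--         else:
--             i += 1
--     return acc * ((n + 1) // 2)
-- ===== Notes on version B (the rewrite author's own statement) =====
-- stated objective: faster
-- what changed: Replaces A's recursion that restarts trial division from 2 for each of the k-1 extracted factors with a single iterative sweep whose trial index never resets (valid because successive smallest factors are non-decreasing), accumulating the product in one loop.
import Mathlib
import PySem

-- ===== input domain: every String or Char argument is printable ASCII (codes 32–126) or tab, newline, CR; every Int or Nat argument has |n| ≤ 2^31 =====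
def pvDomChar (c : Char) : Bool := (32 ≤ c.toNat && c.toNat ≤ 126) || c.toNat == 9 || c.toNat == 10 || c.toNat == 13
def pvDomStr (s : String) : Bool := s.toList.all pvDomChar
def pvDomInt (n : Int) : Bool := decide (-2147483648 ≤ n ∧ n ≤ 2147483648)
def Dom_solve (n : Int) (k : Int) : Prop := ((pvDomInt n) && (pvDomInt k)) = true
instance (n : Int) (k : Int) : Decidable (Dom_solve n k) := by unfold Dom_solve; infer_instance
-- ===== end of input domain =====

-- B merges A's k-1 restarted trial-division scans into one sweep whose index never
-- resets (smallest factors are extracted in non-decreasing order): O(sqrt n + k)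
-- instead of O(k * sqrt n).

-- ===== PORT A =====
-- arithmetic fact both ports' termination proofs cite
lemma int_le_mul_self (i : Int) : i ≤ i * i := by
  by_cases hc : i ≤ 0
  · have h2 : 0 ≤ i * i := mul_self_nonneg i
    omega
  · have h2 : i * 1 ≤ i * i := mul_le_mul_of_nonneg_left (by omega) (by omega)
    omega

-- the 'while i * i <= n: if n % i == 0 … i += 1' scan of A, started at i = 2:
-- first i with i*i ≤ n dividing n, none when the loop falls through
def findFacA (n : Int) (i : Int) : Option Int :=
  if h : i * i ≤ n then
    if PySem.Int.mod n i = 0 then some i else findFacA n (i + 1)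
  else none
termination_by (n + 1 - i).toNat
decreasing_by
  have hi := int_le_mul_self i
  omega

-- literal port of A; the 'k < 1' guard only makes the recursion total
-- (Python A never terminates there, excluded by Pre_solve)
def solve (n : Int) (k : Int) : Int :=
  if k = 1 then PySem.Int.floordiv (n + 1) 2
  else if _h : k < 1 then 0
  else
    match findFacA n 2 with
    | some i => solve (PySem.Int.floordiv n i) (k - 1) * (PySem.Int.floordiv (i + 1) 2)
    | none => solve n (k - 1)
termination_by k.toNat
decreasing_by all_goals omega

-- ===== PORT B =====
-- B's single while loop: state (k, n, i, acc)
def loopB (k : Int) (n : Int) (i : Int) (acc : Int) : Int :=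
  if h : 1 < k ∧ i * i ≤ n then
    if PySem.Int.mod n i = 0 then
      loopB (k - 1) (PySem.Int.floordiv n i) i (acc * PySem.Int.floordiv (i + 1) 2)
    else loopB k n (i + 1) acc
  else acc * PySem.Int.floordiv (n + 1) 2
termination_by (k.toNat, (n + 1 - i).toNat)
decreasing_by
  · left; omega
  · right
    have hi := int_le_mul_self i
    omega

def solve_alt (n : Int) (k : Int) : Int := loopB k n 2 1

-- ===== PRECONDITION & SPEC =====
-- Pre_ excludes k ≤ 0, where Python A recurses forever (RecursionError): k never hits 1.
def Pre_solve (n : Int) (k : Int) : Prop := 1 ≤ k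
instance (n : Int) (k : Int) : Decidable (Pre_solve n k) := by unfold Pre_solve; infer_instance
def pvWitness_solve : Int × Int := (12, 3)

def Spec_solve (n : Int) (k : Int) (out : Int) : Prop := out = solve_alt n k
instance (n : Int) (k : Int) (out : Int) : Decidable (Spec_solve n k out) := by unfold Spec_solve; infer_instance

-- ===== CLAIM (what is proved, stated in full; the proofs are below) =====
def Claim_equal_solve : Prop := ∀ (n : Int) (k : Int), Dom_solve n k → Pre_solve n k → Spec_solve n k (solve n k)

-- ===== LEMMAS AND PROOFS =====

-- A's scan does not see divisors below its start index
lemma findFacA_shift (n : Int) (i j : Int) (hj : 2 ≤ j) (hji : j ≤ i)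
    (hnd : ∀ d : Int, j ≤ d → d < i → PySem.Int.mod n d ≠ 0) :
    findFacA n j = findFacA n i := by
  by_cases hlt : j < i
  · by_cases hsq : j * j ≤ n
    · have hstep : findFacA n j = findFacA n (j + 1) := by
        rw [findFacA]; simp [hsq, hnd j le_rfl hlt]
      rw [hstep]
      exact findFacA_shift n i (j + 1) (by omega) (by omega)
        (fun d hd1 hd2 => hnd d (by omega) hd2)
    · -- j*j > n forces i*i > n too, so both scans return none
      have h1 : j * j ≤ i * j := mul_le_mul_of_nonneg_right hji (by omega)
      have h2 : i * j ≤ i * i := mul_le_mul_of_nonneg_left hji (by omega)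
      have hii : ¬ i * i ≤ n := by omega
      have hL : findFacA n j = none := by rw [findFacA]; simp [hsq]
      have hR : findFacA n i = none := by rw [findFacA]; simp [hii]
      rw [hL, hR]
  · have : j = i := le_antisymm hji (by omega)
    rw [this]
termination_by (i - j).toNat
decreasing_by omega

-- once no factor with i*i ≤ n exists, A just counts k down to 1
lemma solve_of_none (n : Int) (k : Int) (hk : 1 ≤ k)
    (hnone : findFacA n 2 = none) : solve n k = PySem.Int.floordiv (n + 1) 2 := by
  rw [solve]
  by_cases h1 : k = 1
  · simp [h1]
  · rw [if_neg h1, dif_neg (by omega : ¬ k < 1), hnone]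
    exact solve_of_none n (k - 1) (by omega) hnone
termination_by k.toNat
decreasing_by omega

lemma mod_zero_dvd (n d : Int) : PySem.Int.mod n d = 0 ↔ d ∣ n :=
  PySem.Int.mod_eq_zero_iff_dvd n d

-- main invariant: B's loop state (k, n, i, acc) with no divisor of n in [2, i)
-- computes acc * solve n k
lemma loopB_eq_solve (k n i acc : Int) (hk : 1 ≤ k) (hi : 2 ≤ i)
    (hnd : ∀ d : Int, 2 ≤ d → d < i → ¬ d ∣ n) :
    loopB k n i acc = acc * solve n k := by
  rw [loopB]
  by_cases hc : 1 < k ∧ i * i ≤ n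
  · rw [dif_pos hc]
    have hscan : findFacA n 2 = findFacA n i :=
      findFacA_shift n i 2 le_rfl hi
        (fun d hd1 hd2 hm => hnd d hd1 hd2 ((mod_zero_dvd n d).mp hm))
    by_cases hdvd : PySem.Int.mod n i = 0
    · -- extract factor i: A finds the same i as its first divisor
      rw [if_pos hdvd]
      have hfind : findFacA n 2 = some i := by
        rw [hscan, findFacA, dif_pos hc.2, if_pos hdvd]
      have hidvd : i ∣ n := (mod_zero_dvd n i).mp hdvd
      have hq : PySem.Int.floordiv n i = n / i :=
        PySem.Int.floordiv_eq_ediv_of_pos (by omega)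
      have hrec : loopB (k - 1) (PySem.Int.floordiv n i) i
            (acc * PySem.Int.floordiv (i + 1) 2)
          = acc * PySem.Int.floordiv (i + 1) 2 * solve (PySem.Int.floordiv n i) (k - 1) := by
        refine loopB_eq_solve (k - 1) (PySem.Int.floordiv n i) i
          (acc * PySem.Int.floordiv (i + 1) 2) (by omega) hi ?_
        intro d hd1 hd2 hdn
        rw [hq] at hdn
        refine hnd d hd1 hd2 ?_
        have h2 := Dvd.dvd.mul_right hdn i
        rwa [Int.ediv_mul_cancel hidvd] at h2
      have hsolve : solve n k
          = solve (PySem.Int.floordiv n i) (k - 1) * PySem.Int.floordiv (i + 1) 2 := by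
        conv_lhs => rw [solve]
        rw [if_neg (by omega : ¬ k = 1), dif_neg (by omega : ¬ k < 1), hfind]
      rw [hrec, hsolve]
      ring
    · -- i does not divide n: advance the scan index
      rw [if_neg hdvd]
      exact loopB_eq_solve k n (i + 1) acc hk (by omega)
        (fun d hd1 hd2 hdn => by
          rcases lt_or_ge d i with h | h
          · exact hnd d hd1 h hdn
          · have : d = i := by omega
            exact hdvd ((mod_zero_dvd n i).mpr (this ▸ hdn)))
  · rw [dif_neg hc]
    by_cases h1 : k = 1
    · rw [h1, solve]; simp
    · -- k > 1 but i*i > n: A's scan finds nothing, counts down to base case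
      have hsq : ¬ i * i ≤ n := by
        rcases not_and_or.mp hc with h | h
        · omega
        · exact h
      have hnone : findFacA n 2 = none := by
        rw [findFacA_shift n i 2 le_rfl hi
          (fun d hd1 hd2 hm => hnd d hd1 hd2 ((mod_zero_dvd n d).mp hm)),
          findFacA, dif_neg hsq]
      rw [solve_of_none n k hk hnone]
termination_by (k.toNat, (n + 1 - i).toNat)
decreasing_by
  all_goals
    have hii := int_le_mul_self i
    first
      | (left; omega)
      | (right; omega)

-- ===== VERDICT (by name: the statement is the Claim_ definition above) =====
theorem solve_spec : Claim_equal_solve := by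
  intro n k _ hk
  unfold Spec_solve solve_alt
  rw [loopB_eq_solve k n 2 1 hk le_rfl (fun d hd1 hd2 _ => absurd hd2 (by omega)), one_mul]
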